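-- pv_equiv track=rewrite | github.com/deepakrana123/python_learning | DSA/struggle/31Aug.py | flowerGame
-- ===== SOURCE A (Python) =====
-- def flowerGame(n, m):
--     countEven = 0
--     for i in range(1, n + 1):
--         if i % 2 == 0:
--             countEven += 1
--     countOrder = 0
--     for i in range(1, m + 1):
--         if i % 2 != 0:
--             countOrder += 1
--     if countEven == 0 or countOrder == 0:
--         return 0
--     return countOrder + countEven
-- ===== SOURCE B (Python) =====
-- def flowerGame(n, m):
--     countEven = n // 2 if n > 0 else 0
--     countOrder = (m + 1) // 2 if m > 0 else 0
--     return countOrder + countEven if countEven and countOrder else 0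
-- ===== Notes on version B (the rewrite author's own statement) =====
-- stated objective: faster
-- what changed: Replaces the two counting loops over range(1,n+1) and range(1,m+1) with closed-form floor divisions n//2 and (m+1)//2.
import Mathlib
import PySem

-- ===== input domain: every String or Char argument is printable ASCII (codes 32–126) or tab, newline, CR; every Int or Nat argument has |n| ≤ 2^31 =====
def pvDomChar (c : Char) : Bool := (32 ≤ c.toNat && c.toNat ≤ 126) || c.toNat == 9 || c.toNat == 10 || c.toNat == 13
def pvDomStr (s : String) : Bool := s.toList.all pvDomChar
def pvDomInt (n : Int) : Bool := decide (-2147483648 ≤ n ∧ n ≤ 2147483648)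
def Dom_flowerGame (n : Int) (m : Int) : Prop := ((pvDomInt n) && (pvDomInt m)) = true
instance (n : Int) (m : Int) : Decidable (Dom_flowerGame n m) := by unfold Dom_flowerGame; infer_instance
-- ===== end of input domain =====

-- B replaces A's two counting loops with closed-form floor divisions (O(n+m) → O(1)).


-- ===== PORT A =====
def flowerGame (n : Int) (m : Int) : Int :=
  let countEven : Int :=
    (PySem.List.pyRange 1 (n + 1) 1).foldl
      (fun acc i => if PySem.Int.mod i 2 == 0 then acc + 1 else acc) 0
  let countOrder : Int :=
    (PySem.List.pyRange 1 (m + 1) 1).foldl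
      (fun acc i => if PySem.Int.mod i 2 != 0 then acc + 1 else acc) 0
  if countEven == 0 || countOrder == 0 then 0
  else countOrder + countEven

-- ===== PORT B =====
def flowerGame_alt (n : Int) (m : Int) : Int :=
  let countEven : Int := if n > 0 then PySem.Int.floordiv n 2 else 0
  let countOrder : Int := if m > 0 then PySem.Int.floordiv (m + 1) 2 else 0
  if countEven ≠ 0 ∧ countOrder ≠ 0 then countOrder + countEven else 0

-- ===== PRECONDITION & SPEC =====
def Spec_flowerGame (n : Int) (m : Int) (out : Int) : Prop := out = flowerGame_alt n m
instance (n : Int) (m : Int) (out : Int) : Decidable (Spec_flowerGame n m out) := by unfold Spec_flowerGame; infer_instance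

-- ===== CLAIM (what is proved, stated in full; the proofs are below) =====
def Claim_equal_flowerGame : Prop := ∀ (n : Int) (m : Int), Dom_flowerGame n m → Spec_flowerGame n m (flowerGame n m)

-- ===== LEMMAS AND PROOFS =====

-- The even-counting loop over range(1, k+1) equals ⌊k/2⌋ (k a natural number).
theorem pvEvens (k : Nat) :
    ((PySem.List.pyRange 1 ((k : Int) + 1) 1).foldl
      (fun acc i => if PySem.Int.mod i 2 == 0 then acc + 1 else acc) (0 : Int))
      = ((k : Int)) / 2 := by
  induction k with
  | zero => simp [PySem.List.pyRange_one_eq_nil]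
  | succ k ih =>
    have h : ((k : Int) + 1 + 1) = ((k : Int) + 1) + 1 := by ring
    rw [show ((k + 1 : Nat) : Int) + 1 = ((k : Int) + 1) + 1 by push_cast; ring,
        PySem.List.pyRange_one_succ_right (by omega), List.foldl_append, ih]
    simp only [List.foldl]
    rw [PySem.Int.mod_eq_emod_of_pos (by omega)]
    push_cast
    by_cases hp : ((k : Int) + 1) % 2 = 0 <;> simp [hp] <;> omega

-- The odd-counting loop over range(1, k+1) equals ⌊(k+1)/2⌋.
theorem pvOdds (k : Nat) :
    ((PySem.List.pyRange 1 ((k : Int) + 1) 1).foldl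
      (fun acc i => if PySem.Int.mod i 2 != 0 then acc + 1 else acc) (0 : Int))
      = ((k : Int) + 1) / 2 := by
  induction k with
  | zero => simp [PySem.List.pyRange_one_eq_nil]
  | succ k ih =>
    rw [show ((k + 1 : Nat) : Int) + 1 = ((k : Int) + 1) + 1 by push_cast; ring,
        PySem.List.pyRange_one_succ_right (by omega), List.foldl_append, ih]
    simp only [List.foldl]
    rw [PySem.Int.mod_eq_emod_of_pos (by omega)]
    by_cases hp : ((k : Int) + 1) % 2 = 0 <;> simp [hp] <;> omega

-- general-Int versions
theorem pvEvensInt (n : Int) :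
    ((PySem.List.pyRange 1 (n + 1) 1).foldl
      (fun acc i => if PySem.Int.mod i 2 == 0 then acc + 1 else acc) (0 : Int))
      = (if n > 0 then PySem.Int.floordiv n 2 else 0) := by
  by_cases hn : 0 < n
  · have hk : n = ((n.toNat : Nat) : Int) := by omega
    rw [if_pos hn, PySem.Int.floordiv_eq_ediv_of_pos (by omega), hk, pvEvens]
  · rw [if_neg hn, PySem.List.pyRange_one_eq_nil (by omega)]
    rfl

theorem pvOddsInt (m : Int) :
    ((PySem.List.pyRange 1 (m + 1) 1).foldl
      (fun acc i => if PySem.Int.mod i 2 != 0 then acc + 1 else acc) (0 : Int))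
      = (if m > 0 then PySem.Int.floordiv (m + 1) 2 else 0) := by
  by_cases hm : 0 < m
  · have hk : m = ((m.toNat : Nat) : Int) := by omega
    rw [if_pos hm, PySem.Int.floordiv_eq_ediv_of_pos (by omega), hk, pvOdds]
  · rw [if_neg hm, PySem.List.pyRange_one_eq_nil (by omega)]
    rfl

-- ===== VERDICT (by name: the statement is the Claim_ definition above) =====
theorem flowerGame_spec : Claim_equal_flowerGame := by
  intro n m _
  unfold Spec_flowerGame flowerGame flowerGame_alt
  rw [pvEvensInt, pvOddsInt]
  set ce : Int := if n > 0 then PySem.Int.floordiv n 2 else 0 with hce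
  set co : Int := if m > 0 then PySem.Int.floordiv (m + 1) 2 else 0 with hco
  by_cases h1 : ce = 0 <;> by_cases h2 : co = 0 <;> simp [h1, h2]
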